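-- pv_equiv track=rewrite | github.com/lwj2043/vibe | pipelines/preview_builder.py | _pick_entry_html
-- ===== SOURCE A (Python) =====
-- _HTML_EXTS = (".html", ".htm")
--
-- def _pick_entry_html(files: dict[str, str]) -> str | None:
--     """index.html 을 최우선, 그 외 .html 은 경로 짧은 것."""
--     html_paths = [p for p in files if p.lower().endswith(_HTML_EXTS)]
--     if not html_paths:
--         return None
--     for preferred in ("index.html", "index.htm"):
--         for p in html_paths:
--             if p.lower().endswith(preferred) and (
--                 p == preferred or p.lower().rsplit("/", 1)[-1] == preferred
--             ):
--                 return p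
--     html_paths.sort(key=lambda p: (p.count("/"), len(p)))
--     return html_paths[0]
-- ===== SOURCE B (Python) =====
-- def _pick_entry_html(files: dict[str, str]) -> str | None:
--     """One pass: remember first index.html / index.htm basenames and the running
--     shortest-path minimum instead of filtering, two preferred loops and a sort."""
--     idx_html = idx_htm = best = None
--     for p in files:
--         low = p.lower()
--         if not (low.endswith(".html") or low.endswith(".htm")):
--             continue
--         base = low.rsplit("/", 1)[-1]
--         if idx_html is None and base == "index.html":
--             idx_html = p
--         if idx_htm is None and base == "index.htm":
--             idx_htm = p
--         key = (p.count("/"), len(p))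
--         if best is None or key < best[0]:
--             best = (key, p)
--     if idx_html is not None:
--         return idx_html
--     if idx_htm is not None:
--         return idx_htm
--     return best[1] if best is not None else None
-- ===== Notes on version B (the rewrite author's own statement) =====
-- stated objective: simpler
-- what changed: Replaces the filter + two preferred-name scans + stable sort with a single pass that records the first index.html/index.htm basename match and the running (slash-count, length)-minimum, so no intermediate list is built or sorted.
import Mathlib
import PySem

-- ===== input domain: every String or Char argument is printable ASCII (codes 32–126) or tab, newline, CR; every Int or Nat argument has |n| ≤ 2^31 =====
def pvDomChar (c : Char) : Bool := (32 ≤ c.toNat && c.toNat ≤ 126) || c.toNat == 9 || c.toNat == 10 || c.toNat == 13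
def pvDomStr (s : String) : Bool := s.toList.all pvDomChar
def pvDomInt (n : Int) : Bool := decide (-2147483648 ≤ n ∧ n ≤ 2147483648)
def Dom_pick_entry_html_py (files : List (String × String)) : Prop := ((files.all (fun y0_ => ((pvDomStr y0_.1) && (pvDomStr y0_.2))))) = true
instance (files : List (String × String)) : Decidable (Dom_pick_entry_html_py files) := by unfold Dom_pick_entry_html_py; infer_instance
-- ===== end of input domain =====

-- B replaces A's filter + two preferred-name scans + stable sort by one fold that keeps the
-- first index.html / index.htm basename hit and the running (slash-count, length)-minimum
-- (objective: simpler). Both Pythons only read the dict's keys.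

-- ===== PORT A =====
-- `s.rsplit("/", 1)[-1]`: hand port (PySem has no rsplit) — the segment after the last '/',
-- the whole string when '/' does not occur; exact for every string.
def pvLastSeg (cs : List Char) : List Char := (cs.reverse.takeWhile (fun c => c ≠ '/')).reverse

-- `p.lower().endswith((".html", ".htm"))`, the filter test both Pythons contain verbatim
def pvIsHtml (p : String) : Bool :=
  PySem.Chars.endswith (PySem.Chars.lower p.toList) ".html".toList ||
  PySem.Chars.endswith (PySem.Chars.lower p.toList) ".htm".toList

-- A's inner-loop test for one `preferred` name
def pvPrefHit (p : String) (pref : String) : Bool :=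
  PySem.Chars.endswith (PySem.Chars.lower p.toList) pref.toList &&
  (p == pref || pvLastSeg (PySem.Chars.lower p.toList) == pref.toList)

def pick_entry_html_py (files : List (String × String)) : Option String :=
  let keys := PySem.List.dedup (files.map Prod.fst)   -- `for p in files`: the dict's keys
  let html := keys.filter pvIsHtml
  if html = [] then none
  else
    match html.find? (fun p => pvPrefHit p "index.html") with
    | some p => some p
    | none =>
      match html.find? (fun p => pvPrefHit p "index.htm") with
      | some p => some p
      | none =>
        (PySem.List.sorted2 html (fun p => PySem.Str.count p "/") (fun p => PySem.Str.len p)).head?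

-- ===== PORT B =====
-- `p.lower().rsplit("/", 1)[-1]` of B
def pvBase (p : String) : List Char := pvLastSeg (PySem.Chars.lower p.toList)

-- Python's tuple comparison `(p.count("/"), len(p)) < best[0]`
def pvKeyLt (p m : String) : Bool :=
  decide (PySem.Str.count p "/" < PySem.Str.count m "/") ||
  (decide (PySem.Str.count p "/" = PySem.Str.count m "/") && decide (PySem.Str.len p < PySem.Str.len m))

-- `if best is None or key < best[0]: best = (key, p)` (the path is kept, its key recomputed)
def pvMinStep (m : Option String) (p : String) : Option String :=
  match m with
  | none => some p
  | some m' => if pvKeyLt p m' then some p else some m'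

-- one iteration of B's single loop: state = (idx_html, idx_htm, best-path)
def pvStepB (st : Option String × Option String × Option String) (p : String) :
    Option String × Option String × Option String :=
  if pvIsHtml p then
    ((if st.1 = none ∧ pvBase p = "index.html".toList then some p else st.1),
     (if st.2.1 = none ∧ pvBase p = "index.htm".toList then some p else st.2.1),
     pvMinStep st.2.2 p)
  else st

def pick_entry_html_py_alt (files : List (String × String)) : Option String :=
  let st := (PySem.List.dedup (files.map Prod.fst)).foldl pvStepB (none, none, none)
  match st.1 with
  | some p => some p
  | none =>
    match st.2.1 with
    | some p => some p
    | none => st.2.2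

-- ===== PRECONDITION & SPEC =====
def Spec_pick_entry_html_py (files : List (String × String)) (out : Option String) : Prop := out = pick_entry_html_py_alt files
instance (files : List (String × String)) (out : Option String) : Decidable (Spec_pick_entry_html_py files out) := by unfold Spec_pick_entry_html_py; infer_instance

-- ===== CLAIM (what is proved, stated in full; the proofs are below) =====
def Claim_equal_pick_entry_html_py : Prop := ∀ (files : List (String × String)), Dom_pick_entry_html_py files → Spec_pick_entry_html_py files (pick_entry_html_py files)

-- ===== LEMMAS AND PROOFS =====

-- the rsplit segment is a suffix of its string
lemma pvLastSeg_suffix (cs : List Char) : pvLastSeg cs <:+ cs := by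
  have h := List.takeWhile_prefix (l := cs.reverse) (p := fun c => decide (c ≠ '/'))
  rw [← List.reverse_prefix]
  simpa [pvLastSeg] using h

-- A's preferred-name test is exactly "the lowercase basename equals `pref`",
-- for a `pref` that is already lowercase and slash-free
lemma pvPrefHit_eq (p pref : String)
    (h1 : pvLastSeg pref.toList = pref.toList)
    (h2 : PySem.Chars.lower pref.toList = pref.toList) :
    pvPrefHit p pref = decide (pvBase p = pref.toList) := by
  by_cases hb : pvBase p = pref.toList
  · have hsuf : pref.toList <:+ PySem.Chars.lower p.toList := by
      rw [← hb]; exact pvLastSeg_suffix _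
    have hend : PySem.Chars.endswith (PySem.Chars.lower p.toList) pref.toList = true :=
      (PySem.Chars.endswith_iff _ _).mpr hsuf
    simp [pvPrefHit, hend, pvBase] at *
    simp [hb]
  · by_cases hp : p = pref
    · exfalso
      apply hb
      simp [pvBase, hp, h2, h1]
    · have : (p == pref) = false := by simp [hp]
      simp [pvPrefHit, pvBase] at *
      simp [this, hb]

-- a "keep the first hit" loop is find?
lemma pvFoldlFirst {α : Type} (P : α → Prop) [DecidablePred P] :
    ∀ (l : List α) (acc : Option α),
      l.foldl (fun acc x => if acc = none ∧ P x then some x else acc) acc =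
        acc.or (l.find? (fun x => decide (P x))) := by
  intro l
  induction l with
  | nil => intro acc; cases acc <;> simp
  | cons x t ih =>
    intro acc
    cases acc with
    | some a => simp [List.foldl_cons, ih]
    | none =>
      by_cases hx : P x
      · simp [List.foldl_cons, hx, ih, List.find?]
      · simp [List.foldl_cons, hx, ih, List.find?]

-- the head of an insertion sort is the first minimum of the running-min loop
lemma pvHeadFoldlInsertBy {α : Type} (lt : α → α → Bool) :
    ∀ (l : List α) (acc : List α),
      (l.foldl (fun acc x => PySem.List.insertBy lt x acc) acc).head? =
        l.foldl (fun m x =>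
          match m with
          | none => some x
          | some m => if lt x m then some x else some m) acc.head? := by
  intro l
  induction l with
  | nil => intro acc; simp
  | cons x t ih =>
    intro acc
    rw [List.foldl_cons, List.foldl_cons, ih]
    congr 1
    cases acc with
    | nil => simp [PySem.List.insertBy]
    | cons y ys =>
      by_cases h : lt x y
      · simp [PySem.List.insertBy, h]
      · simp [PySem.List.insertBy, h]

-- lexicographic "less" written with = equals the asymmetric form sorted2 uses
lemma pvLexEq (a b : Nat) (c d : Int) :
    (decide (a < b) || (decide (a = b) && decide (c < d))) =
      (decide (a < b) || (!decide (b < a) && decide (c < d))) := by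
  by_cases h1 : a < b
  · simp [h1]
  · by_cases h2 : a = b
    · subst h2; simp
    · have h3 : b < a := by omega
      simp [Nat.lt_asymm h3, h2, h3]

-- B's tuple test in the form sorted2 uses
lemma pvKeyLt_eq (p m : String) :
    pvKeyLt p m = (decide (PySem.Str.count p "/" < PySem.Str.count m "/") ||
      (!decide (PySem.Str.count m "/" < PySem.Str.count p "/") &&
        decide (PySem.Str.len p < PySem.Str.len m))) := by
  unfold pvKeyLt
  exact pvLexEq (PySem.Str.count p "/") (PySem.Str.count m "/") (PySem.Str.len p) (PySem.Str.len m)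

-- the core equality, on an arbitrary key list
lemma pvCore (keys : List String) :
    (if keys.filter pvIsHtml = [] then (none : Option String)
     else
       match (keys.filter pvIsHtml).find? (fun p => pvPrefHit p "index.html") with
       | some p => some p
       | none =>
         match (keys.filter pvIsHtml).find? (fun p => pvPrefHit p "index.htm") with
         | some p => some p
         | none =>
           (PySem.List.sorted2 (keys.filter pvIsHtml) (fun p => PySem.Str.count p "/")
             (fun p => PySem.Str.len p)).head?) =
    (match (keys.foldl pvStepB
        ((none : Option String), (none : Option String), (none : Option String))).1 with
     | some p => some p
     | none =>
       match (keys.foldl pvStepB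
          ((none : Option String), (none : Option String), (none : Option String))).2.1 with
       | some p => some p
       | none => (keys.foldl pvStepB
          ((none : Option String), (none : Option String), (none : Option String))).2.2) := by
  -- B: push the html filter out of the loop, then split the triple state
  have hB : keys.foldl pvStepB ((none : Option String), (none : Option String), (none : Option String)) =
      ((keys.filter pvIsHtml).foldl
        (fun acc x => if acc = none ∧ pvBase x = "index.html".toList then some x else acc) none,
       (keys.filter pvIsHtml).foldl
        (fun acc x => if acc = none ∧ pvBase x = "index.htm".toList then some x else acc) none,
       (keys.filter pvIsHtml).foldl pvMinStep none) := by
    unfold pvStepB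
    rw [PySem.List.foldl_if_eq_foldl_filter (p := pvIsHtml)
      (f := fun st (p : String) =>
        ((if st.1 = none ∧ pvBase p = "index.html".toList then some p else st.1),
         (if st.2.1 = none ∧ pvBase p = "index.htm".toList then some p else st.2.1),
         pvMinStep st.2.2 p))]
    rw [PySem.List.foldl_prod_mk
      (f := fun (acc : Option String) (p : String) =>
        if acc = none ∧ pvBase p = "index.html".toList then some p else acc)
      (g := fun (st : Option String × Option String) (p : String) =>
        ((if st.1 = none ∧ pvBase p = "index.htm".toList then some p else st.1),
         pvMinStep st.2 p))]
    rw [PySem.List.foldl_prod_mk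
      (f := fun (acc : Option String) (p : String) =>
        if acc = none ∧ pvBase p = "index.htm".toList then some p else acc)
      (g := pvMinStep)]
  -- A: rewrite the two find?'s and the sorted head
  have hf1 : (keys.filter pvIsHtml).find? (fun p => pvPrefHit p "index.html") =
      (keys.filter pvIsHtml).find? (fun p => decide (pvBase p = "index.html".toList)) := by
    congr 1
    funext p
    exact pvPrefHit_eq p "index.html" (by decide) (by decide)
  have hf2 : (keys.filter pvIsHtml).find? (fun p => pvPrefHit p "index.htm") =
      (keys.filter pvIsHtml).find? (fun p => decide (pvBase p = "index.htm".toList)) := by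
    congr 1
    funext p
    exact pvPrefHit_eq p "index.htm" (by decide) (by decide)
  have hsort : (PySem.List.sorted2 (keys.filter pvIsHtml) (fun p => PySem.Str.count p "/")
      (fun p => PySem.Str.len p)).head? =
      (keys.filter pvIsHtml).foldl pvMinStep none := by
    show (List.foldl (fun acc x => PySem.List.insertBy (fun a b =>
        decide (PySem.Str.count a "/" < PySem.Str.count b "/") ||
        (!decide (PySem.Str.count b "/" < PySem.Str.count a "/") &&
          decide (PySem.Str.len a < PySem.Str.len b))) x acc) [] (keys.filter pvIsHtml)).head? = _
    rw [pvHeadFoldlInsertBy]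
    simp only [List.head?_nil]
    apply PySem.List.foldl_congr_mem
    intro acc x _
    cases acc with
    | none => rfl
    | some m => simp [pvMinStep, pvKeyLt_eq]
  rw [hB, hf1, hf2, hsort,
    pvFoldlFirst (fun p => pvBase p = "index.html".toList),
    pvFoldlFirst (fun p => pvBase p = "index.htm".toList)]
  by_cases hnil : keys.filter pvIsHtml = []
  · simp [hnil]
  · simp only [if_neg hnil, Option.or]

-- ===== VERDICT (by name: the statement is the Claim_ definition above) =====
theorem pick_entry_html_py_spec : Claim_equal_pick_entry_html_py := by
  intro files _
  unfold Spec_pick_entry_html_py pick_entry_html_py pick_entry_html_py_alt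
  exact pvCore (PySem.List.dedup (files.map Prod.fst))
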